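-- pv_equiv track=rewrite | github.com/FunctionSIG/Ancestral-Blocks-Reconstruction | findParent.py | countDup
-- ===== SOURCE A (Python) =====
-- def countDup(Genome):
--     # splitting Genome into blocks of gene
--     gene_list=Genome.split('|')
--     gene_dup=set()
--     # iterate through the list of gene blocks
--     for item in gene_list:
--         # iterate through each gene in a gene block
--         for index in range (len(item)):
--             # iterate from the index next to our gene (need checking) to the end of the gene block
--             for i in range(index+1, len(item)):
--                 if item[index] == item[i]:
--                     gene_dup.add(item[index])
--     return gene_dup
-- ===== SOURCE B (Python) =====
-- def countDup(Genome):
--     # Different algorithm: per block, count character occurrences in one pass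
--     # with a dict, then one pass adding every character whose count is >= 2
--     # (O(L) per block instead of A's O(L^2) all-pairs comparison; same set,
--     # and chars are added in the same first-occurrence order as A).
--     gene_dup = set()
--     for item in Genome.split('|'):
--         counts = {}
--         for ch in item:
--             counts[ch] = counts.get(ch, 0) + 1
--         for ch in item:
--             if counts[ch] >= 2:
--                 gene_dup.add(ch)
--     return gene_dup
-- ===== Notes on version B (the rewrite author's own statement) =====
-- stated objective: faster
-- what changed: Replaced A's triple-nested all-pairs index comparison per block with a single counting pass (dict of occurrence counts) followed by one pass that collects every character whose count is at least 2.
import Mathlib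
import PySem

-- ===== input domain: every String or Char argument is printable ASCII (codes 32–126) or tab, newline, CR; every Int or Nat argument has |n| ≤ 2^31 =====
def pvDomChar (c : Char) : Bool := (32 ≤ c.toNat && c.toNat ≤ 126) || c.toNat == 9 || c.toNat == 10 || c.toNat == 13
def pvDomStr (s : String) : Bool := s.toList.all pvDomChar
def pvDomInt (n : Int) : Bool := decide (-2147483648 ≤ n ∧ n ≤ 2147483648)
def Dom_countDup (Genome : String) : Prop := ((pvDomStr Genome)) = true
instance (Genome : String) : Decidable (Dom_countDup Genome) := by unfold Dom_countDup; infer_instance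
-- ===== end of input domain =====

-- B replaces A's O(L^2) all-pairs comparison per block with one counting pass (a dict
-- of occurrence counts) plus one collecting pass; same returned set.

-- ===== PORT A =====
-- triple nested loop: for each '|'-block, all pairs (index, i) with index < i; add item[index] on a match
def countDup (Genome : String) : List String :=
  let gene_list := PySem.Chars.splitOn Genome.toList ['|']
  gene_list.foldl
    (fun gene_dup item =>
      (PySem.List.pyRange 0 (PySem.Chars.len item) 1).foldl
        (fun gd index =>
          (PySem.List.pyRange (index + 1) (PySem.Chars.len item) 1).foldl
            (fun gd2 i =>
              -- item[index] == item[i]; both indices always in range (pyGetD exact here)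
              if PySem.List.pyGetD item index ' ' = PySem.List.pyGetD item i ' ' then
                PySem.Set.add gd2 (String.singleton (PySem.List.pyGetD item index ' '))
              else gd2)
            gd)
        gene_dup)
    PySem.Set.empty

-- ===== PORT B =====
-- per block: counting pass building the dict, then a pass adding chars with count >= 2
def countDup_alt (Genome : String) : List String :=
  (PySem.Chars.splitOn Genome.toList ['|']).foldl
    (fun gene_dup item =>
      -- counts[ch] = counts.get(ch, 0) + 1
      let counts := item.foldl (fun d ch => PySem.Dict.modify d ch 0 (fun v => v + 1)) PySem.Dict.empty
      -- counts[ch] >= 2 — every ch of item is a key of counts, so the total lookup is exact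
      item.foldl
        (fun gd ch =>
          if 2 ≤ PySem.Dict.getD counts ch (0 : Int) then PySem.Set.add gd (String.singleton ch) else gd)
        gene_dup)
    PySem.Set.empty

-- ===== PRECONDITION & SPEC =====
def Spec_countDup (Genome : String) (out : List String) : Prop := out = countDup_alt Genome
instance (Genome : String) (out : List String) : Decidable (Spec_countDup Genome out) := by unfold Spec_countDup; infer_instance

-- ===== CLAIM (what is proved, stated in full; the proofs are below) =====
def Claim_equal_countDup : Prop := ∀ (Genome : String), Dom_countDup Genome → Spec_countDup Genome (countDup Genome)

-- ===== LEMMAS AND PROOFS =====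

-- reference form of the per-block loop: add the char when it re-occurs later in the block
def fA : List Char → List String → List String
  | [], s => s
  | c :: rest, s => fA rest (if c ∈ rest then PySem.Set.add s (String.singleton c) else s)

theorem set_add_mem {s : List String} {x : String} (h : x ∈ s) : PySem.Set.add s x = s := by
  unfold PySem.Set.add
  rw [if_pos ((PySem.Set.contains_iff s x).mpr h)]

-- the inner i-loop of A, seen over the list of scanned characters
theorem foldl_match_add (c : Char) (x : String) :
    ∀ (l : List Char) (s : List String),
      l.foldl (fun gd ch => if c = ch then PySem.Set.add gd x else gd) s
        = if c ∈ l then PySem.Set.add s x else s := by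
  intro l
  induction l with
  | nil => intro s; simp [List.foldl]
  | cons d rest ih =>
    intro s
    by_cases hd : c = d
    · subst hd
      simp only [List.foldl, List.mem_cons, true_or, if_pos, ih]
      by_cases hr : c ∈ rest
      · simp [hr]
      · simp [hr]
    · simp only [List.foldl, if_neg hd, ih, List.mem_cons]
      simp [hd]

-- A's inner range loop starting at a scans exactly full.drop a
theorem innerA_eq (full : List Char) (a : Nat) (c : Char) (s : List String) :
    (PySem.List.pyRange (a : Int) (PySem.Chars.len full) 1).foldl
        (fun gd i => if c = PySem.List.pyGetD full i ' ' then
            PySem.Set.add gd (String.singleton c) else gd) s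
      = if c ∈ full.drop a then PySem.Set.add s (String.singleton c) else s := by
  rw [PySem.Chars.len_eq]
  have hmap := PySem.List.map_pyGetD_pyRange full ' ' (a := (a : Int)) (by positivity)
  rw [PySem.List.len_eq, Int.toNat_natCast] at hmap
  rw [← foldl_match_add c (String.singleton c) (full.drop a) s, ← hmap, List.foldl_map]

-- A's outer index loop over full = pre ++ suf, started at index pre.length, is fA suf
theorem outerA_eq :
    ∀ (suf pre : List Char) (s : List String),
      (PySem.List.pyRange (pre.length : Int) (PySem.Chars.len (pre ++ suf)) 1).foldl
          (fun gd index =>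
            (PySem.List.pyRange (index + 1) (PySem.Chars.len (pre ++ suf)) 1).foldl
              (fun gd2 i =>
                if PySem.List.pyGetD (pre ++ suf) index ' ' = PySem.List.pyGetD (pre ++ suf) i ' ' then
                  PySem.Set.add gd2 (String.singleton (PySem.List.pyGetD (pre ++ suf) index ' '))
                else gd2)
              gd)
          s
        = fA suf s := by
  intro suf
  induction suf with
  | nil =>
    intro pre s
    rw [PySem.Chars.len_eq]
    simp [PySem.List.pyRange, fA]
  | cons c rest ih =>
    intro pre s
    have hlen : (pre.length : Int) < PySem.Chars.len (pre ++ c :: rest) := by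
      rw [PySem.Chars.len_eq]; simp
    rw [PySem.List.pyRange_one_cons hlen]
    simp only [List.foldl]
    have hget : PySem.List.pyGetD (pre ++ c :: rest) (pre.length : Int) ' ' = c := by
      rw [PySem.List.pyGetD_natCast]
      simp [List.getD_eq_getElem?_getD]
    have hdrop : List.drop (pre.length + 1) (pre ++ c :: rest) = rest := by
      simp [List.drop_append]
    have hinner :
        (PySem.List.pyRange ((pre.length : Int) + 1) (PySem.Chars.len (pre ++ c :: rest)) 1).foldl
            (fun gd2 i =>
              if PySem.List.pyGetD (pre ++ c :: rest) (pre.length : Int) ' '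
                  = PySem.List.pyGetD (pre ++ c :: rest) i ' ' then
                PySem.Set.add gd2 (String.singleton (PySem.List.pyGetD (pre ++ c :: rest) (pre.length : Int) ' '))
              else gd2)
            s
          = if c ∈ rest then PySem.Set.add s (String.singleton c) else s := by
      rw [hget]
      have hcast : (pre.length : Int) + 1 = ((pre.length + 1 : Nat) : Int) := by push_cast; ring
      rw [hcast, innerA_eq (pre ++ c :: rest) (pre.length + 1) c s, hdrop]
    rw [hinner]
    have happ : pre ++ c :: rest = (pre ++ [c]) ++ rest := by simp
    have hcast2 : (pre.length : Int) + 1 = (((pre ++ [c]).length : Nat) : Int) := by simp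
    rw [fA]
    conv_lhs => rw [hcast2, happ]
    exact ih (pre ++ [c]) _

-- B's collecting pass (condition: count in the whole block ≥ 2) agrees with fA, given
-- that every already-scanned duplicated char is in the set
theorem foldB_eq_fA (full : List Char) :
    ∀ (suf pre : List Char) (s : List String), full = pre ++ suf →
      (∀ c : Char, c ∈ pre → 2 ≤ full.count c → String.singleton c ∈ s) →
      suf.foldl
          (fun gd ch => if 2 ≤ (full.count ch : Int) then
              PySem.Set.add gd (String.singleton ch) else gd) s
        = fA suf s := by
  intro suf
  induction suf with
  | nil => intro pre s _ _; rfl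
  | cons c rest ih =>
    intro pre s hfull hinv
    have hsplit : full.count c = pre.count c + (1 + rest.count c) := by
      subst hfull; simp [List.count_append, List.count_cons_self]; ring
    simp only [List.foldl, fA]
    by_cases h2 : 2 ≤ (full.count c : Int)
    · rw [if_pos h2]
      by_cases hr : c ∈ rest
      · rw [if_pos hr]
        refine ih (pre ++ [c]) _ (by simp [hfull]) ?_
        intro c' hc' hcnt
        rcases List.mem_append.mp hc' with h | h
        · exact (PySem.Set.mem_add s (String.singleton c) (String.singleton c')).mpr
            (Or.inl (hinv c' h hcnt))
        · simp only [List.mem_singleton] at h; subst h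
          exact (PySem.Set.mem_add s (String.singleton c') (String.singleton c')).mpr (Or.inr rfl)
      · rw [if_neg hr]
        have hrest0 : rest.count c = 0 := List.count_eq_zero.mpr hr
        have h2' : 2 ≤ full.count c := by exact_mod_cast h2
        have hpre : 1 ≤ pre.count c := by omega
        have hcm : c ∈ pre := List.count_pos_iff.mp (by omega)
        have hmem : String.singleton c ∈ s := hinv c hcm h2'
        rw [set_add_mem hmem]
        refine ih (pre ++ [c]) s (by simp [hfull]) ?_
        intro c' hc' hcnt'
        rcases List.mem_append.mp hc' with h | h
        · exact hinv c' h hcnt'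
        · simp only [List.mem_singleton] at h; subst h; exact hmem
    · rw [if_neg h2]
      have h2' : full.count c < 2 := by exact_mod_cast (by omega : (full.count c : Int) < 2)
      have hr : c ∉ rest := by
        intro hmem
        have := List.count_pos_iff.mpr hmem
        omega
      rw [if_neg hr]
      refine ih (pre ++ [c]) s (by simp [hfull]) ?_
      intro c' hc' hcnt'
      rcases List.mem_append.mp hc' with h | h
      · exact hinv c' h hcnt'
      · simp only [List.mem_singleton] at h; subst h; omega

-- the dict built by B's counting pass holds exactly the occurrence counts
theorem counts_getD (item : List Char) (ch : Char) :
    PySem.Dict.getD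
        (item.foldl (fun d c => PySem.Dict.modify d c 0 (fun v => v + 1)) PySem.Dict.empty)
        ch 0
      = (item.count ch : Int) := by
  rw [PySem.Dict.getD_foldl_modify_add_one]
  simp [PySem.Dict.empty, PySem.Dict.getD, PySem.Dict.get?]

-- per-block bodies of the two ports coincide
theorem perItem_eq (item : List Char) (s : List String) :
    (PySem.List.pyRange 0 (PySem.Chars.len item) 1).foldl
        (fun gd index =>
          (PySem.List.pyRange (index + 1) (PySem.Chars.len item) 1).foldl
            (fun gd2 i =>
              if PySem.List.pyGetD item index ' ' = PySem.List.pyGetD item i ' ' then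
                PySem.Set.add gd2 (String.singleton (PySem.List.pyGetD item index ' '))
              else gd2)
            gd)
        s
      = item.foldl
          (fun gd ch =>
            if 2 ≤ PySem.Dict.getD
                (item.foldl (fun d c => PySem.Dict.modify d c 0 (fun v => v + 1)) PySem.Dict.empty)
                ch (0 : Int)
              then PySem.Set.add gd (String.singleton ch) else gd)
          s := by
  have hA := outerA_eq item [] s
  simp only [List.nil_append, List.length_nil, Nat.cast_zero] at hA
  rw [hA]
  have hB : item.foldl
      (fun gd ch =>
        if 2 ≤ PySem.Dict.getD
            (item.foldl (fun d c => PySem.Dict.modify d c 0 (fun v => v + 1)) PySem.Dict.empty) ch (0 : Int)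
          then PySem.Set.add gd (String.singleton ch) else gd) s
      = item.foldl
        (fun gd ch => if 2 ≤ (item.count ch : Int) then
            PySem.Set.add gd (String.singleton ch) else gd) s := by
    apply List.foldl_ext
    intro gd ch _
    rw [counts_getD item ch]
  rw [hB]
  exact (foldB_eq_fA item item [] s (by simp) (by intro c h; simp at h)).symm

-- ===== VERDICT (by name: the statement is the Claim_ definition above) =====
theorem countDup_spec : Claim_equal_countDup := by
  intro Genome _
  unfold Spec_countDup countDup countDup_alt
  apply List.foldl_ext
  intro s item _
  exact perItem_eq item s
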